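-- pv_equiv track=rewrite | github.com/TanelPaal/Programming-Introductory-Course | ExtraMaterial/test6.py | sum_elements_around_last_three
-- ===== SOURCE A (Python) =====
-- def sum_elements_around_last_three(nums: list) -> int:
--     """
--     Find sum of elements before and after last 3 in the list.
--
--     If there is no 3 in the list or list is too short
--     or there is no element before or after last 3 return 0.
--
--     Note if 3 is last element in the list you must return
--     sum of elements before and after 3 which is before last.
--
--
--     sum_elements_around_last_three([1, 3, 7]) -> 8
--     sum_elements_around_last_three([1, 2, 3, 4, 6, 4, 3, 4, 5, 3, 4, 5, 6]) -> 9
--     sum_elements_around_last_three([1, 2, 3, 4, 6, 4, 3, 4, 5, 3, 3, 2, 3]) -> 5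
--     sum_elements_around_last_three([1, 2, 3]) -> 0
--
--     :param nums: given list of ints
--     :return: sum of elements before and after last 3
--     """
--     if 3 not in nums or len(nums) < 3:
--         return 0
--     all_indexes = [num for num, x in enumerate(nums) if x == 3]
--     if len(all_indexes) == 1 and all_indexes[0] == len(nums) - 1:
--         return 0
--     elif all_indexes[-1] == len(nums) - 1:
--         index = all_indexes[-2]
--         return nums[index - 1] + nums[index + 1]
--     else:
--         index = all_indexes[-1]
--         return nums[index - 1] + nums[index + 1]
-- ===== SOURCE B (Python) =====
-- def sum_elements_around_last_three(nums: list) -> int: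
--     if len(nums) < 3:
--         return 0
--     for i in range(len(nums) - 2, -1, -1):
--         if nums[i] == 3:
--             return nums[i - 1] + nums[i + 1]
--     return 0
-- ===== Notes on version B (the rewrite author's own statement) =====
-- stated objective: simpler
-- what changed: Replaces building the full list of indexes of 3 plus last/second-to-last case analysis by a single reverse scan from index len-2 that returns at the first 3 found (early exit), dropping the separate '3 in nums' membership pass.
import Mathlib
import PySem

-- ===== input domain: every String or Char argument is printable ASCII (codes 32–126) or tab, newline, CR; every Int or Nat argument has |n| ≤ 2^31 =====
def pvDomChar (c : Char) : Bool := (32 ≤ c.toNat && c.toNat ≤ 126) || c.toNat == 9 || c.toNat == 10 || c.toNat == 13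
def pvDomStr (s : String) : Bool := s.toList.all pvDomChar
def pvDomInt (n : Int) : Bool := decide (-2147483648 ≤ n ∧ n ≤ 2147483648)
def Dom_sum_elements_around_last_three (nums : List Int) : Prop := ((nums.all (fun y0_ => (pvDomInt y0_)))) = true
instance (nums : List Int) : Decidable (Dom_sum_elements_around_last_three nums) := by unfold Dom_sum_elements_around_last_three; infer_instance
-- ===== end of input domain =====

-- B replaces A's index-list construction and its last/second-to-last case split by a single
-- reverse scan with early exit (objective: simpler).


-- ===== PORT A =====
def sum_elements_around_last_three (nums : List Int) : Int :=
  if (3 : Int) ∉ nums ∨ nums.length < 3 then 0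
  else
    let allIdx := ((PySem.List.enumerate nums).filter (fun p => p.2 == 3)).map (fun p => p.1)
    if allIdx.length = 1 ∧ PySem.List.pyGetD allIdx 0 0 = (nums.length : Int) - 1 then 0
    else if PySem.List.pyGetD allIdx (-1) 0 = (nums.length : Int) - 1 then
      let index := PySem.List.pyGetD allIdx (-2) 0
      PySem.List.pyGetD nums (index - 1) 0 + PySem.List.pyGetD nums (index + 1) 0
    else
      let index := PySem.List.pyGetD allIdx (-1) 0
      PySem.List.pyGetD nums (index - 1) 0 + PySem.List.pyGetD nums (index + 1) 0

-- ===== PORT B =====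
-- the `for i in range(len(nums)-2, -1, -1)` loop of Source B, as a countdown recursion on i
def pvAltScan (nums : List Int) (i : Nat) : Int :=
  if PySem.List.pyGetD nums (i : Int) 0 = 3 then
    PySem.List.pyGetD nums ((i : Int) - 1) 0 + PySem.List.pyGetD nums ((i : Int) + 1) 0
  else
    match i with
    | 0 => 0
    | j + 1 => pvAltScan nums j

def sum_elements_around_last_three_alt (nums : List Int) : Int :=
  if nums.length < 3 then 0 else pvAltScan nums (nums.length - 2)

-- ===== PRECONDITION & SPEC =====
def Spec_sum_elements_around_last_three (nums : List Int) (out : Int) : Prop := out = sum_elements_around_last_three_alt nums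
instance (nums : List Int) (out : Int) : Decidable (Spec_sum_elements_around_last_three nums out) := by unfold Spec_sum_elements_around_last_three; infer_instance

-- ===== CLAIM (what is proved, stated in full; the proofs are below) =====
def Claim_equal_sum_elements_around_last_three : Prop := ∀ (nums : List Int), Dom_sum_elements_around_last_three nums → Spec_sum_elements_around_last_three nums (sum_elements_around_last_three nums)

-- ===== LEMMAS AND PROOFS =====

-- the indices of value 3 among the first k positions (as Python ints)
def F3 (nums : List Int) (k : Nat) : List Int :=
  (PySem.List.pyRange 0 (k : Int)).filter (fun j => PySem.List.pyGetD nums j 0 == 3)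

theorem F3_succ (nums : List Int) (k : Nat) :
    F3 nums (k + 1) =
      F3 nums k ++ (if PySem.List.pyGetD nums (k : Int) 0 = 3 then [(k : Int)] else []) := by
  unfold F3
  rw [show ((k + 1 : Nat) : Int) = (k : Int) + 1 by push_cast; ring,
    PySem.List.pyRange_one_succ_right (by positivity), List.filter_append, List.filter_singleton]
  by_cases h : PySem.List.pyGetD nums (k : Int) 0 = 3 <;> simp [h]

theorem mem_F3 (nums : List Int) (k : Nat) (j : Int) :
    j ∈ F3 nums k ↔ 0 ≤ j ∧ j < k ∧ PySem.List.pyGetD nums j 0 = 3 := by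
  simp [F3, List.mem_filter, PySem.List.mem_pyRange_one]
  tauto

theorem F3_nil_of_not_mem (nums : List Int) (h : (3 : Int) ∉ nums) (k : Nat)
    (hk : k ≤ nums.length) : F3 nums k = [] := by
  rw [List.eq_nil_iff_forall_not_mem]
  intro j hj
  rw [mem_F3] at hj
  obtain ⟨h0, h1, h2⟩ := hj
  rw [PySem.List.pyGetD_eq_getElem nums 0 h0 (by exact_mod_cast lt_of_lt_of_le h1 (by exact_mod_cast hk))] at h2
  exact h (h2 ▸ List.getElem_mem _)

theorem F3_ne_nil_of_mem (nums : List Int) (h : (3 : Int) ∈ nums) : F3 nums nums.length ≠ [] := by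
  obtain ⟨k, hk, hv⟩ := List.getElem_of_mem h
  intro hnil
  have : (k : Int) ∈ F3 nums nums.length := by
    rw [mem_F3]
    refine ⟨by positivity, by exact_mod_cast hk, ?_⟩
    rw [PySem.List.pyGetD_natCast, List.getD_eq_getElem _ _ hk, hv]
  simp [hnil] at this

theorem scan_eq (nums : List Int) (i : Nat) :
    pvAltScan nums i =
      match (F3 nums (i + 1)).getLast? with
      | none => 0
      | some j => PySem.List.pyGetD nums (j - 1) 0 + PySem.List.pyGetD nums (j + 1) 0 := by
  induction i with
  | zero =>
    rw [pvAltScan, F3_succ]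
    by_cases h : PySem.List.pyGetD nums (0 : Int) 0 = 3 <;> simp [h, F3]
  | succ j ih =>
    rw [pvAltScan, F3_succ nums (j + 1)]
    by_cases h : PySem.List.pyGetD nums (((j : Nat) + 1 : Nat) : Int) 0 = 3
    · have h' : PySem.List.pyGetD nums ((j : Int) + 1) 0 = 3 := by push_cast at h; exact h
      simp [h']
    · have h' : ¬ PySem.List.pyGetD nums ((j : Int) + 1) 0 = 3 := by push_cast at h; exact h
      simp [h', ih]

-- A's all_indexes equals F3 over the whole list
theorem allIdx_eq (nums : List Int) :
    ((PySem.List.enumerate nums).filter (fun p => p.2 == 3)).map (fun p => p.1) =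
      F3 nums nums.length := by
  rw [PySem.List.enumerate_eq_map_pyRange nums 0, List.filter_map, List.map_map]
  simp only [F3, PySem.List.len]
  exact List.map_id _

-- ===== VERDICT (by name: the statement is the Claim_ definition above) =====
theorem sum_elements_around_last_three_spec : Claim_equal_sum_elements_around_last_three := by
  intro nums _
  unfold Spec_sum_elements_around_last_three sum_elements_around_last_three sum_elements_around_last_three_alt
  by_cases hlen : nums.length < 3
  · simp [hlen]
  · rw [if_neg hlen, scan_eq]
    by_cases hmem : (3 : Int) ∈ nums
    · rw [if_neg (by simp [hmem, hlen])]
      have h3 : 3 ≤ nums.length := by omega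
      obtain ⟨m, hm⟩ : ∃ m, nums.length = m + 1 := ⟨nums.length - 1, by omega⟩
      have hm2 : 2 ≤ m := by omega
      have hstep : nums.length - 2 + 1 = m := by omega
      rw [hstep, allIdx_eq]
      have hsplit := F3_succ nums m
      by_cases hq : PySem.List.pyGetD nums (m : Int) 0 = 3
      · rw [hm, hsplit, if_pos hq]
        by_cases hnil : F3 nums m = []
        · rw [hnil]
          simp only [List.nil_append]
          rw [if_pos ⟨by simp, by rw [PySem.List.pyGetD_zero_cons]; push_cast; ring⟩]
          simp
        · have hlast := List.getLast?_eq_some_getLast hnil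
          rw [hlast]
          have hL : 1 ≤ (F3 nums m).length := List.length_pos_iff.mpr hnil
          have hlen2 : 2 ≤ (F3 nums m ++ [(m : Int)]).length := by simp; omega
          have hv : PySem.List.pyGetD (F3 nums m ++ [(m : Int)]) (-2) 0 = (F3 nums m).getLast hnil := by
            rw [PySem.List.pyGetD_neg_ofNat _ 2 0 (by omega) hlen2,
              List.getElem_append_left (by simp; omega), List.getLast_eq_getElem]
            congr 1
            simp
          rw [if_neg (by rintro ⟨hc, -⟩; rw [List.length_append, List.length_singleton] at hc; omega),
            if_pos (by rw [PySem.List.pyGetD_neg_one_append_singleton]; push_cast; ring), hv]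
      · have hne : F3 nums m ≠ [] := by
          intro hnil
          exact F3_ne_nil_of_mem nums hmem (by rw [hm, hsplit, if_neg hq, hnil]; rfl)
        rw [hm, hsplit, if_neg hq, List.append_nil]
        have hlast := List.getLast?_eq_some_getLast hne
        have hlt : ∀ x ∈ F3 nums m, x < (m : Int) := by
          intro x hx; exact ((mem_F3 nums m x).mp hx).2.1
        have hgl : (F3 nums m).getLast hne ≠ ((m + 1 : Nat) : Int) - 1 := by
          have := hlt _ (List.getLast_mem hne)
          push_cast; omega
        rw [hlast, if_neg ?hc1, if_neg (by rw [PySem.List.pyGetD_neg_one _ _ hne]; exact hgl),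
          PySem.List.pyGetD_neg_one _ _ hne]
        case hc1 =>
          rintro ⟨-, hc⟩
          obtain ⟨a, t, ha⟩ := List.exists_cons_of_ne_nil hne
          rw [ha, PySem.List.pyGetD_zero_cons] at hc
          have := hlt a (by rw [ha]; exact List.mem_cons_self)
          push_cast at hc; omega
    · rw [if_pos (Or.inl hmem),
        F3_nil_of_not_mem nums hmem _ (by omega)]
      rfl
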